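-- pv_equiv track=rewrite | github.com/uio-bmi/track_rand | lib/hb/quick/extra/TrackIntersection.py | prepareDataForPlot
-- ===== SOURCE A (Python) =====
-- from collections import Counter
--
-- def prepareDataForPlot(genome, targetBins):
--     chrs = []; dataY = [] # froms = []; tos = []
--     for i in range(0,len(targetBins)):
--         tmp = str(targetBins[i]).split(":")
--         chrs = chrs + [tmp[0]]
--         #tmp2 = str(tmp[1]).split("-")
--         #froms = froms + [tmp2[0]]
--     c = Counter(chrs)
--     if genome == 'hg19':
--         chrNames = ['chr1','chr2','chr3','chr4','chr5','chr6','chr7','chr8','chr9','chr10','chr11','chr12','chr13','chr14','chr15','chr16','chr17','chr18','chr19','chr20','chr21','chr22','chrX','chrY']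
--     if genome == 'mm9':
--         chrNames = ['chr1','chr2','chr3','chr4','chr5','chr6','chr7','chr8','chr9','chr10','chr11','chr12','chr13','chr14','chr15','chr16','chr17','chr18','chr19','chrX','chrY']
--     for i in chrNames:
--         dataY = dataY + [c[i]]
--     return dataY #[[None if x==0 else x for x in dataY]]
-- ===== SOURCE B (Python) =====
-- def prepareDataForPlot(genome, targetBins):
--     if genome == 'hg19':
--         chrNames = ['chr1','chr2','chr3','chr4','chr5','chr6','chr7','chr8','chr9','chr10','chr11','chr12','chr13','chr14','chr15','chr16','chr17','chr18','chr19','chr20','chr21','chr22','chrX','chrY']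
--     if genome == 'mm9':
--         chrNames = ['chr1','chr2','chr3','chr4','chr5','chr6','chr7','chr8','chr9','chr10','chr11','chr12','chr13','chr14','chr15','chr16','chr17','chr18','chr19','chrX','chrY']
--     return [sum(1 for b in targetBins if str(b).split(':')[0] == name) for name in chrNames]
-- ===== Notes on version B (the rewrite author's own statement) =====
-- stated objective: simpler
-- what changed: B drops the index loop, the intermediate chromosome list and the Counter entirely: it directly counts, for each fixed chromosome name, the target bins whose field before ':' equals that name (one comprehension instead of build-list + Counter + lookup loop).
import Mathlib
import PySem

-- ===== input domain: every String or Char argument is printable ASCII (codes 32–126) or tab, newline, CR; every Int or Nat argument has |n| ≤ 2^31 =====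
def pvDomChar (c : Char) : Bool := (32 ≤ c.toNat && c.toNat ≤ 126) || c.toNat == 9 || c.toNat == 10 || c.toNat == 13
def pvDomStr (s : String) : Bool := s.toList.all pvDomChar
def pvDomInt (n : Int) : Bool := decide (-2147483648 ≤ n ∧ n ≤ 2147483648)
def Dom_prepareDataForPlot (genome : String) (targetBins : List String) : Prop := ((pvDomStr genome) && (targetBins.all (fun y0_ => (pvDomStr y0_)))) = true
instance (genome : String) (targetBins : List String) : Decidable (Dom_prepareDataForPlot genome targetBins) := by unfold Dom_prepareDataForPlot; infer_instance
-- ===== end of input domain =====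

-- B replaces A's index loop + Counter + lookup loop by one comprehension that counts, per fixed
-- chromosome name, the bins whose field before ':' equals it (simpler; not claimed faster).

-- ===== PORT A =====
def pvChrNamesHg19 : List String := ["chr1","chr2","chr3","chr4","chr5","chr6","chr7","chr8","chr9","chr10","chr11","chr12","chr13","chr14","chr15","chr16","chr17","chr18","chr19","chr20","chr21","chr22","chrX","chrY"]
def pvChrNamesMm9 : List String := ["chr1","chr2","chr3","chr4","chr5","chr6","chr7","chr8","chr9","chr10","chr11","chr12","chr13","chr14","chr15","chr16","chr17","chr18","chr19","chrX","chrY"]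

def prepareDataForPlot (genome : String) (targetBins : List String) : List Int :=
  -- for i in range(0, len(targetBins)): tmp = str(targetBins[i]).split(':'); chrs = chrs + [tmp[0]]
  -- (tmp[0] via pyGetD: split(':') is always nonempty, so the IndexError branch is unreachable)
  let chrs : List String := (PySem.List.pyRange 0 (targetBins.length : Int) 1).foldl
    (fun chrs i =>
      chrs ++ [PySem.List.pyGetD (((PySem.Str.split? (PySem.List.pyGetD targetBins i "") ":").getD [])) 0 ""]) []
  let c := PySem.Dict.counter chrs
  -- the two bare ifs; an unknown genome leaves chrNames unbound in Python (NameError, excluded by Pre_)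
  let chrNames : List String :=
    if genome == "hg19" then pvChrNamesHg19
    else if genome == "mm9" then pvChrNamesMm9
    else []
  chrNames.foldl (fun dataY i => dataY ++ [c.getD i 0]) []

-- ===== PORT B =====
def prepareDataForPlot_alt (genome : String) (targetBins : List String) : List Int :=
  let chrNames : List String :=
    if genome == "hg19" then pvChrNamesHg19
    else if genome == "mm9" then pvChrNamesMm9
    else []
  chrNames.map (fun name =>
    (targetBins.countP (fun b => PySem.List.pyGetD (((PySem.Str.split? b ":").getD [])) 0 "" == name) : Int))

-- ===== PRECONDITION & SPEC =====
-- Pre_ excludes only genomes other than 'hg19'/'mm9', on which both Pythons raise NameError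
-- (chrNames is never assigned).
def Pre_prepareDataForPlot (genome : String) (targetBins : List String) : Prop :=
  genome = "hg19" ∨ genome = "mm9"
instance (genome : String) (targetBins : List String) : Decidable (Pre_prepareDataForPlot genome targetBins) := by unfold Pre_prepareDataForPlot; infer_instance

def pvWitness_prepareDataForPlot : String × List String := ("hg19", ["chr1:0-100", "chr2:5-9", "chr1:7-8"])

def Spec_prepareDataForPlot (genome : String) (targetBins : List String) (out : List Int) : Prop := out = prepareDataForPlot_alt genome targetBins
instance (genome : String) (targetBins : List String) (out : List Int) : Decidable (Spec_prepareDataForPlot genome targetBins out) := by unfold Spec_prepareDataForPlot; infer_instance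

-- ===== CLAIM (what is proved, stated in full; the proofs are below) =====
def Claim_equal_prepareDataForPlot : Prop := ∀ (genome : String) (targetBins : List String), Dom_prepareDataForPlot genome targetBins → Pre_prepareDataForPlot genome targetBins → Spec_prepareDataForPlot genome targetBins (prepareDataForPlot genome targetBins)

-- ===== LEMMAS AND PROOFS =====

-- ===== VERDICT (by name: the statement is the Claim_ definition above) =====
theorem prepareDataForPlot_spec : Claim_equal_prepareDataForPlot := by
  intro genome targetBins _ _
  unfold Spec_prepareDataForPlot prepareDataForPlot prepareDataForPlot_alt
  simp only [PySem.List.foldl_append_singleton_eq_map,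
    PySem.Dict.getD_counter, List.count_eq_countP, List.countP_map, Function.comp_def,
    List.nil_append]
  congr 1
  funext x
  conv_rhs => rw [← PySem.List.map_pyGetD_pyRange_zero' targetBins ""]
  simp [List.countP_map, Function.comp_def]
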